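-- pv_equiv track=rewrite | github.com/akhandsingh17/assignments | codingexercise/MovePositiveNumbersEnd.py | MovePositiveNumbersEnd
-- ===== SOURCE A (Python) =====
-- def MovePositiveNumbersEnd(ary):
--
--     for i in range(1,len(ary)):
--
--         key=ary[i]
--
--         if key>0:
--             continue
--
--         k=i-1
--         while (k>=0 and ary[k]>0):
--             ary[k+1]=ary[k]
--             k=k-1
--         ary[k+1]=key
--
--     return ary
-- ===== SOURCE B (Python) =====
-- def MovePositiveNumbersEnd(ary):
--     # one-pass stable partition: non-positives first, then positives (in-place like A)
--     ary[:] = [x for x in ary if x <= 0] + [x for x in ary if x > 0]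
--     return ary
-- ===== Notes on version B (the rewrite author's own statement) =====
-- stated objective: faster
-- what changed: replaced the insertion-style O(n^2) shifting loop with a single-pass stable partition that concatenates the non-positive and positive elements
import Mathlib
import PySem

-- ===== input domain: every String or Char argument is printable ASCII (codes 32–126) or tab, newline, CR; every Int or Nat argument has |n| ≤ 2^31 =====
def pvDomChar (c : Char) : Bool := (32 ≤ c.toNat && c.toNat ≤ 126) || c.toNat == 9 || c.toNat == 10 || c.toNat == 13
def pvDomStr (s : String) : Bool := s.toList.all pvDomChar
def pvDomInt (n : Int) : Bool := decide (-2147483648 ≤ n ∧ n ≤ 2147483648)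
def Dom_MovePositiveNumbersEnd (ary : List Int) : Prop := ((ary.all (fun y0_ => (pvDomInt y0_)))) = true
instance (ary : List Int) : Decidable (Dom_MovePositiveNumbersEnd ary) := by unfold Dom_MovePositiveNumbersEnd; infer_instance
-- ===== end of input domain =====

-- B replaces A's insertion-style quadratic shifting with a one-pass stable partition
-- (non-positives then positives); A mutates ary in place, B performs the same in-place
-- update via ary[:] = …, and the equivalence proved here is about the return value.

-- ===== PORT A =====
-- inner while loop of A: j plays the role of k+1 (so the guard k >= 0 is j > 0);
-- ary[k] is read with getD (the index is always in range when A runs)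
def pvShiftLoop (ary : List Int) (j : Nat) (key : Int) : List Int :=
  match j with
  | 0 => ary.set 0 key
  | Nat.succ j' =>
    let v := ary.getD j' 0
    if 0 < v then pvShiftLoop (ary.set (j' + 1) v) j' key
    else ary.set (j' + 1) key

def MovePositiveNumbersEnd (ary : List Int) : List Int :=
  (List.range' 1 (ary.length - 1)).foldl
    (fun a i =>
      let key := a.getD i 0
      if 0 < key then a
      else pvShiftLoop a i key) ary

-- ===== PORT B =====
def MovePositiveNumbersEnd_alt (ary : List Int) : List Int :=
  ary.filter (fun x => decide (x ≤ 0)) ++ ary.filter (fun x => decide (0 < x))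

-- ===== PRECONDITION & SPEC =====
def Spec_MovePositiveNumbersEnd (ary : List Int) (out : List Int) : Prop := out = MovePositiveNumbersEnd_alt ary
instance (ary : List Int) (out : List Int) : Decidable (Spec_MovePositiveNumbersEnd ary out) := by unfold Spec_MovePositiveNumbersEnd; infer_instance

-- ===== CLAIM (what is proved, stated in full; the proofs are below) =====
def Claim_equal_MovePositiveNumbersEnd : Prop := ∀ (ary : List Int), Dom_MovePositiveNumbersEnd ary → Spec_MovePositiveNumbersEnd ary (MovePositiveNumbersEnd ary)

-- ===== LEMMAS AND PROOFS =====

-- abbreviation for the stable-partition value, used only in the proofs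
def pvP (l : List Int) : List Int :=
  l.filter (fun x => decide (x ≤ 0)) ++ l.filter (fun x => decide (0 < x))

theorem pvShiftLoop_succ (ary : List Int) (j' : Nat) (key : Int) :
    pvShiftLoop ary (j' + 1) key =
      if 0 < ary.getD j' 0 then pvShiftLoop (ary.set (j' + 1) (ary.getD j' 0)) j' key
      else ary.set (j' + 1) key := rfl

theorem pvP_length (l : List Int) : (pvP l).length = l.length := by
  induction l with
  | nil => rfl
  | cons x t ih =>
    by_cases h : x ≤ 0 <;>
      simp_all [pvP, List.length_append]; omega

theorem pv_getD_mid (l r : List Int) (x d : Int) (n : Nat) (h : n = l.length) :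
    (l ++ x :: r).getD n d = x := by
  subst h
  induction l with
  | nil => rfl
  | cons y t ih => simpa using ih

theorem pv_set_mid (l r : List Int) (x y : Int) (n : Nat) (h : n = l.length) :
    (l ++ x :: r).set n y = l ++ y :: r := by
  subst h
  induction l with
  | nil => rfl
  | cons z t ih => simpa using ih

-- the inner while loop inserts `key` before the trailing positive run; the slot at
-- index neg.length + pos.length may hold any value g (it is overwritten)
theorem pvShiftLoop_eq (pos : List Int) : ∀ (neg rest : List Int) (g key : Int),
    (∀ x ∈ neg, x ≤ 0) → (∀ x ∈ pos, 0 < x) →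
    pvShiftLoop (neg ++ pos ++ g :: rest) (neg.length + pos.length) key
      = neg ++ key :: (pos ++ rest) := by
  induction pos using List.reverseRecOn with
  | nil =>
    intro neg rest g key hneg _
    rcases neg.eq_nil_or_concat with rfl | ⟨n', z, rfl⟩
    · simp [pvShiftLoop]
    · simp only [List.concat_eq_append] at hneg ⊢
      have hz : z ≤ 0 := hneg z (by simp)
      have e1 : (n' ++ [z]) ++ [] ++ g :: rest = n' ++ z :: g :: rest := by simp
      have hlen : (n' ++ [z]).length + ([] : List Int).length = n'.length + 1 := by
        simp
      have e2 : n' ++ z :: g :: rest = (n' ++ [z]) ++ g :: rest := by simp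
      rw [hlen, e1, pvShiftLoop_succ,
        pv_getD_mid n' (g :: rest) z 0 n'.length rfl, if_neg (by omega), e2,
        pv_set_mid (n' ++ [z]) rest g key (n'.length + 1) (by simp)]
      simp
  | append_singleton pos' p ih =>
    intro neg rest g key hneg hpos
    have hp : 0 < p := hpos p (by simp)
    have hlen : neg.length + (pos' ++ [p]).length = (neg.length + pos'.length) + 1 := by
      simp only [List.length_append, List.length_cons, List.length_nil]; omega
    have e1 : neg ++ (pos' ++ [p]) ++ g :: rest = (neg ++ pos') ++ p :: g :: rest := by
      simp
    rw [hlen, e1, pvShiftLoop_succ,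
      pv_getD_mid (neg ++ pos') (g :: rest) p 0 (neg.length + pos'.length) (by simp),
      if_pos hp]
    have e2 : (neg ++ pos') ++ p :: g :: rest = ((neg ++ pos') ++ [p]) ++ g :: rest := by
      simp
    rw [e2, pv_set_mid ((neg ++ pos') ++ [p]) rest g p ((neg.length + pos'.length) + 1)
      (by simp only [List.length_append, List.length_cons, List.length_nil])]
    have hrec := ih neg (p :: rest) p key hneg (fun x hx => hpos x (by simp [hx]))
    have e3 : ((neg ++ pos') ++ [p]) ++ p :: rest = neg ++ pos' ++ p :: p :: rest := by
      simp
    rw [e3, hrec]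
    simp

theorem pvP_singleton (x : Int) : pvP [x] = [x] := by
  by_cases h : x ≤ 0
  · simp [pvP, h, not_lt.mpr h]
  · simp [pvP, h, not_le.mp h]

theorem pv_main (m : Nat) (ary : List Int) (h : m + 1 ≤ ary.length) :
    (List.range' 1 m).foldl
      (fun a i =>
        let key := a.getD i 0
        if 0 < key then a
        else pvShiftLoop a i key) ary
    = pvP (ary.take (m + 1)) ++ ary.drop (m + 1) := by
  induction m with
  | zero =>
    rcases ary with _ | ⟨x, t⟩
    · simp at h
    · simp [pvP_singleton]
  | succ m ih =>
    have hm : m + 1 ≤ ary.length := by omega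
    have hlt : m + 1 < ary.length := by omega
    rw [List.range'_concat, List.foldl_append, ih hm]
    set key := ary[m + 1]'hlt with hkey
    have hdrop : ary.drop (m + 1) = key :: ary.drop (m + 2) := by
      rw [hkey, List.getElem_cons_drop]
    have htake : ary.take (m + 2) = ary.take (m + 1) ++ [key] := by
      rw [List.take_add_one, hkey]
      simp [List.getElem?_eq_getElem hlt]
    set neg := (ary.take (m + 1)).filter (fun x => decide (x ≤ 0)) with hneg
    set pos := (ary.take (m + 1)).filter (fun x => decide (0 < x)) with hpos
    have hstate : pvP (ary.take (m + 1)) ++ ary.drop (m + 1)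
        = (neg ++ pos) ++ key :: ary.drop (m + 2) := by
      rw [hdrop]; simp [pvP, hneg, hpos, List.append_assoc]
    have hnplen : (neg ++ pos).length = m + 1 := by
      have h1 := pvP_length (ary.take (m + 1))
      have h2 : (ary.take (m + 1)).length = m + 1 := by
        rw [List.length_take]; omega
      simp only [pvP] at h1
      simpa [hneg, hpos, h2] using h1
    have hget : (pvP (ary.take (m + 1)) ++ ary.drop (m + 1)).getD (1 + m) 0 = key := by
      rw [hstate]
      exact pv_getD_mid (neg ++ pos) (ary.drop (m + 2)) key 0 (1 + m)
        (by rw [hnplen]; omega)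
    simp only [List.foldl_cons, List.foldl_nil, one_mul]
    rw [hget]
    by_cases hk : 0 < key
    · rw [if_pos hk, htake, hdrop]
      simp [pvP, List.filter_append, hk, not_le.mpr hk, List.append_assoc]
    · rw [if_neg hk, hstate]
      have hmem_neg : ∀ x ∈ neg, x ≤ 0 := by
        intro x hx; rw [hneg] at hx; exact of_decide_eq_true (List.mem_filter.mp hx).2
      have hmem_pos : ∀ x ∈ pos, 0 < x := by
        intro x hx; rw [hpos] at hx; exact of_decide_eq_true (List.mem_filter.mp hx).2
      have hshift := pvShiftLoop_eq pos neg (ary.drop (m + 2)) key key hmem_neg hmem_pos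
      have hlen2 : neg.length + pos.length = 1 + m := by
        have := hnplen; simp only [List.length_append] at this; omega
      rw [hlen2] at hshift
      rw [List.append_assoc] at hshift
      rw [List.append_assoc, hshift, htake]
      simp [pvP, hneg, hpos, List.filter_append, hk, not_lt.mp hk, List.append_assoc]

-- ===== VERDICT (by name: the statement is the Claim_ definition above) =====
theorem MovePositiveNumbersEnd_spec : Claim_equal_MovePositiveNumbersEnd := by
  intro ary _
  show MovePositiveNumbersEnd ary = MovePositiveNumbersEnd_alt ary
  rcases ary with _ | ⟨x, t⟩
  · rfl
  · have h : (x :: t).length - 1 + 1 ≤ (x :: t).length := by simp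
    have := pv_main ((x :: t).length - 1) (x :: t) h
    unfold MovePositiveNumbersEnd
    rw [this]
    have hL : (x :: t).length - 1 + 1 = (x :: t).length := by simp
    rw [hL, List.take_length, List.drop_length]
    simp [pvP, MovePositiveNumbersEnd_alt]
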